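-- pv_equiv track=rewrite | github.com/tna76874/notebooks-school | notebooks/modules/infomodules/sprache.py | normalisiere_umlaut
-- ===== SOURCE A (Python) =====
-- def normalisiere_umlaut(text):
--     umlaute_dict = {
--         'ae': 'ä', 'Ae': 'Ä', 'AE': 'Ä',
--         'oe': 'ö', 'Oe': 'Ö', 'OE': 'Ö',
--         'ue': 'ü', 'Ue': 'Ü', 'UE': 'Ü'
--     }
--     for key, value in umlaute_dict.items():
--         text = text.replace(key, value)
--     return text
-- ===== SOURCE B (Python) =====
-- def normalisiere_umlaut(text):
--     umlaute_dict = {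
--         'ae': 'ä', 'Ae': 'Ä', 'AE': 'Ä',
--         'oe': 'ö', 'Oe': 'Ö', 'OE': 'Ö',
--         'ue': 'ü', 'Ue': 'Ü', 'UE': 'Ü'
--     }
--     out = []
--     i = 0
--     n = len(text)
--     while i < n:
--         rep = umlaute_dict.get(text[i:i+2])
--         if rep is not None:
--             out.append(rep)
--             i += 2
--         else:
--             out.append(text[i])
--             i += 1
--     return ''.join(out)
-- ===== Notes on version B (the rewrite author's own statement) =====
-- stated objective: alternative
-- what changed: Replaces the nine sequential full-string text.replace passes by a single greedy left-to-right scan that looks up each two-character window in the dict and advances by 2 on a hit; correct because keys never overlap (they start in a/A/o/O/u/U and end in e/E) and the replacement umlauts never form new keys; it makes one pass instead of nine but trades C-level replace for a Python-level loop, so it is not faster in CPython.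
import Mathlib
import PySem

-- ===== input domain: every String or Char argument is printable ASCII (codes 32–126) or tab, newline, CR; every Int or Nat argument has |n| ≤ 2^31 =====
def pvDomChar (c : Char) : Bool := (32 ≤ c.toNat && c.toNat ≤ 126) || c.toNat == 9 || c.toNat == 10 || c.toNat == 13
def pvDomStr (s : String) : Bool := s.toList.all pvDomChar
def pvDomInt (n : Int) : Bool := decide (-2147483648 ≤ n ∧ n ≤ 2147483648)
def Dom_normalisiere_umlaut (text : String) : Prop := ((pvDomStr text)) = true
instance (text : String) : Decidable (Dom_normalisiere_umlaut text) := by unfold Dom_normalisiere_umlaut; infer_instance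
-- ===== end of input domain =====

-- B replaces A's nine sequential full-string replace passes by one greedy left-to-right
-- scan with a two-character window (alternative decomposition; not faster in CPython).

-- ===== PORT A =====
def pvUmlauteDict : PySem.Dict String String :=
  PySem.Dict.ofList [("ae", "ä"), ("Ae", "Ä"), ("AE", "Ä"),
                     ("oe", "ö"), ("Oe", "Ö"), ("OE", "Ö"),
                     ("ue", "ü"), ("Ue", "Ü"), ("UE", "Ü")]

def normalisiere_umlaut (text : String) : String :=
  (PySem.Dict.items pvUmlauteDict).foldl (fun t kv => PySem.Str.replace t kv.1 kv.2) text

-- ===== PORT B =====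
def pvUmlautMap : PySem.Dict (List Char) Char :=
  PySem.Dict.ofList [(['a','e'], 'ä'), (['A','e'], 'Ä'), (['A','E'], 'Ä'),
                     (['o','e'], 'ö'), (['O','e'], 'Ö'), (['O','E'], 'Ö'),
                     (['u','e'], 'ü'), (['U','e'], 'Ü'), (['U','E'], 'Ü')]

-- the while loop of Source B: look up the (at most two-character) window, advance 2 on a hit
def pvScan : List Char → List Char
  | [] => []
  | [c] =>
    match PySem.Dict.get? pvUmlautMap [c] with
    | some r => [r]
    | none => [c]
  | c :: c2 :: t =>
    match PySem.Dict.get? pvUmlautMap [c, c2] with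
    | some r => r :: pvScan t
    | none => c :: pvScan (c2 :: t)

def normalisiere_umlaut_alt (text : String) : String :=
  String.ofList (pvScan text.toList)

-- ===== PRECONDITION & SPEC =====
def Spec_normalisiere_umlaut (text : String) (out : String) : Prop := out = normalisiere_umlaut_alt text
instance (text : String) (out : String) : Decidable (Spec_normalisiere_umlaut text out) := by unfold Spec_normalisiere_umlaut; infer_instance

-- ===== CLAIM (what is proved, stated in full; the proofs are below) =====
def Claim_equal_normalisiere_umlaut : Prop := ∀ (text : String), Dom_normalisiere_umlaut text → Spec_normalisiere_umlaut text (normalisiere_umlaut text)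

-- ===== LEMMAS AND PROOFS =====

-- fuel-free form of one Python str.replace pass with a two-character pattern
def rep2 (x y v : Char) : List Char → List Char
  | [] => []
  | [c] => [c]
  | c :: c2 :: t => if c = x ∧ c2 = y then v :: rep2 x y v t else c :: rep2 x y v (c2 :: t)

lemma go_eq (x y v : Char) : ∀ (fuel : Nat) (l acc : List Char), l.length ≤ fuel →
    PySem.Chars.replace.go [x, y] [v] fuel l acc = acc.reverse ++ rep2 x y v l := by
  intro fuel
  induction fuel with
  | zero =>
    intro l acc h
    have : l = [] := by cases l <;> simp_all
    subst this
    simp [PySem.Chars.replace.go, rep2]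
  | succ f ih =>
    intro l acc h
    match l with
    | [] => simp [PySem.Chars.replace.go, rep2]
    | [c] =>
      have hp : ([x, y].isPrefixOf [c]) = false := by
        simp [List.isPrefixOf]
      rw [PySem.Chars.replace.go]
      simp only [hp]
      rw [ih [] (c :: acc) (by simp)]
      simp [rep2]
    | c :: c2 :: t =>
      rw [PySem.Chars.replace.go]
      by_cases hx : c = x ∧ c2 = y
      · obtain ⟨rfl, rfl⟩ := hx
        have hp : ([c, c2].isPrefixOf (c :: c2 :: t)) = true := by
          simp [List.isPrefixOf]
        simp only [hp, if_pos]
        rw [show (c :: c2 :: t).drop ([c,c2].length) = t by simp]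
        rw [show ([v].reverse ++ acc) = v :: acc by simp]
        rw [ih t (v :: acc) (by simp at h ⊢; omega)]
        simp [rep2]
      · have hp : ([x, y].isPrefixOf (c :: c2 :: t)) = false := by
          simp [List.isPrefixOf]
          intro h1 h2; exact hx ⟨h1.symm, h2.symm⟩
        simp only [hp]
        rw [ih (c2 :: t) (c :: acc) (by simpa using Nat.le_of_succ_le_succ h)]
        rw [rep2]
        simp [hx]

lemma replace_eq_rep2 (x y v : Char) (l : List Char) :
    PySem.Chars.replace l [x, y] [v] = rep2 x y v l := by
  rw [PySem.Chars.replace]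
  rw [if_neg (by simp)]
  rw [go_eq x y v l.length l [] le_rfl]
  simp

lemma rep2_cons_of_ne (x y v c : Char) (m : List Char) (h : c ≠ x) :
    rep2 x y v (c :: m) = c :: rep2 x y v m := by
  cases m <;> simp [rep2, h]

lemma rep2_cons₂_of_ne (x y v c c2 : Char) (m : List Char) (h : ¬(c = x ∧ c2 = y)) :
    rep2 x y v (c :: c2 :: m) = c :: rep2 x y v (c2 :: m) := by
  simp [rep2, h]

lemma rep2_cons_eq (x y v : Char) (m : List Char) :
    rep2 x y v (x :: y :: m) = v :: rep2 x y v m := by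
  simp [rep2]

-- the nine (first char, second char, replacement) triples, in A's dict order
def pvTriples : List (Char × Char × Char) :=
  [('a','e','ä'), ('A','e','Ä'), ('A','E','Ä'),
   ('o','e','ö'), ('O','e','Ö'), ('O','E','Ö'),
   ('u','e','ü'), ('U','e','Ü'), ('U','E','Ü')]

def goodT (t : Char × Char × Char) : Bool :=
  (t.1 ∈ (['a','A','o','O','u','U'] : List Char)) &&
  (t.2.1 ∈ (['e','E'] : List Char)) &&
  (t.2.2 ∈ (['ä','Ä','ö','Ö','ü','Ü'] : List Char))

lemma goodT_split (t : Char × Char × Char) (h : goodT t = true) :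
    (t.1 = 'a' ∨ t.1 = 'A' ∨ t.1 = 'o' ∨ t.1 = 'O' ∨ t.1 = 'u' ∨ t.1 = 'U') ∧
    (t.2.1 = 'e' ∨ t.2.1 = 'E') ∧
    (t.2.2 = 'ä' ∨ t.2.2 = 'Ä' ∨ t.2.2 = 'ö' ∨ t.2.2 = 'Ö' ∨ t.2.2 = 'ü' ∨ t.2.2 = 'Ü') := by
  unfold goodT at h
  simp only [Bool.and_eq_true, decide_eq_true_eq, List.mem_cons, List.not_mem_nil, or_false] at h
  exact ⟨h.1.1, h.1.2, h.2⟩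

lemma goodT_first_ne_E (t : Char × Char × Char) (h : goodT t = true) (c : Char)
    (hc : c = 'e' ∨ c = 'E') : c ≠ t.1 := by
  obtain ⟨h1, _, _⟩ := goodT_split t h
  rcases hc with rfl | rfl <;> rcases h1 with h1 | h1 | h1 | h1 | h1 | h1 <;> rw [h1] <;> simp

lemma goodT_first_ne_umlaut (t : Char × Char × Char) (h : goodT t = true) (v : Char)
    (hv : v ∈ (['ä','Ä','ö','Ö','ü','Ü'] : List Char)) : v ≠ t.1 := by
  obtain ⟨h1, _, _⟩ := goodT_split t h
  simp only [List.mem_cons, List.not_mem_nil, or_false] at hv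
  rcases hv with rfl | rfl | rfl | rfl | rfl | rfl <;>
    rcases h1 with h1 | h1 | h1 | h1 | h1 | h1 <;> rw [h1] <;> simp

lemma goodT_snd_ne (t : Char × Char × Char) (h : goodT t = true) (d : Char)
    (hd1 : d ≠ 'e') (hd2 : d ≠ 'E') : d ≠ t.2.1 := by
  obtain ⟨_, h2, _⟩ := goodT_split t h
  rcases h2 with h2 | h2 <;> rw [h2] <;> assumption

lemma goodT_val_ne_E (t : Char × Char × Char) (h : goodT t = true) :
    t.2.2 ≠ 'e' ∧ t.2.2 ≠ 'E' := by
  obtain ⟨_, _, h3⟩ := goodT_split t h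
  rcases h3 with h3 | h3 | h3 | h3 | h3 | h3 <;> rw [h3] <;> exact ⟨by simp, by simp⟩

-- A's fold, on the list-of-chars side
def chain (ts : List (Char × Char × Char)) (l : List Char) : List Char :=
  ts.foldl (fun s t => rep2 t.1 t.2.1 t.2.2 s) l

lemma chain_cons (t : Char × Char × Char) (ts : List (Char × Char × Char)) (l : List Char) :
    chain (t :: ts) l = chain ts (rep2 t.1 t.2.1 t.2.2 l) := rfl

lemma chain_nil (ts : List (Char × Char × Char)) : chain ts [] = [] := by
  induction ts with
  | nil => rfl
  | cons t ts ih => rw [chain_cons, show rep2 t.1 t.2.1 t.2.2 [] = [] from rfl]; exact ih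

lemma chain_singleton (ts : List (Char × Char × Char)) (c : Char) : chain ts [c] = [c] := by
  induction ts with
  | nil => rfl
  | cons t ts ih => rw [chain_cons, show rep2 t.1 t.2.1 t.2.2 [c] = [c] from rfl]; exact ih

lemma chain_cons_E (ts : List (Char × Char × Char)) (hts : ∀ t ∈ ts, goodT t = true)
    (c : Char) (hc : c = 'e' ∨ c = 'E') (m : List Char) :
    chain ts (c :: m) = c :: chain ts m := by
  induction ts generalizing m with
  | nil => rfl
  | cons t ts ih =>
    rw [chain_cons, rep2_cons_of_ne _ _ _ _ _ (goodT_first_ne_E t (hts t (by simp)) c hc),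
        chain_cons]
    exact ih (fun t ht => hts t (by simp [ht])) _

lemma chain_cons_umlaut (ts : List (Char × Char × Char)) (hts : ∀ t ∈ ts, goodT t = true)
    (v : Char) (hv : v ∈ (['ä','Ä','ö','Ö','ü','Ü'] : List Char)) (m : List Char) :
    chain ts (v :: m) = v :: chain ts m := by
  induction ts generalizing m with
  | nil => rfl
  | cons t ts ih =>
    rw [chain_cons, rep2_cons_of_ne _ _ _ _ _ (goodT_first_ne_umlaut t (hts t (by simp)) v hv),
        chain_cons]
    exact ih (fun t ht => hts t (by simp [ht])) _

lemma chain_window_ne (ts : List (Char × Char × Char)) (hts : ∀ t ∈ ts, goodT t = true)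
    (c c2 : Char) (hw : ∀ t ∈ ts, ¬(c = t.1 ∧ c2 = t.2.1)) (hc2 : c2 = 'e' ∨ c2 = 'E')
    (m : List Char) :
    chain ts (c :: c2 :: m) = c :: c2 :: chain ts m := by
  induction ts generalizing m with
  | nil => rfl
  | cons t ts ih =>
    rw [chain_cons, rep2_cons₂_of_ne _ _ _ _ _ _ (hw t (by simp)),
        rep2_cons_of_ne _ _ _ _ _ (goodT_first_ne_E t (hts t (by simp)) c2 hc2), chain_cons]
    exact ih (fun t ht => hts t (by simp [ht])) (fun t ht => hw t (by simp [ht])) _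

lemma chain_keep (ts : List (Char × Char × Char)) (hts : ∀ t ∈ ts, goodT t = true) :
    ∀ (d : Char) (m : List Char), d ≠ 'e' → d ≠ 'E' →
      (∃ d' m', chain ts (d :: m) = d' :: m' ∧ d' ≠ 'e' ∧ d' ≠ 'E') ∧
      (∀ c, chain ts (c :: d :: m) = c :: chain ts (d :: m)) := by
  induction ts with
  | nil => exact fun d m hd1 hd2 => ⟨⟨d, m, rfl, hd1, hd2⟩, fun c => rfl⟩
  | cons t ts ih =>
    intro d m hd1 hd2
    have hg : goodT t = true := hts t (by simp)
    have hts' : ∀ t ∈ ts, goodT t = true := fun t ht => hts t (by simp [ht])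
    have step : ∃ d' m', rep2 t.1 t.2.1 t.2.2 (d :: m) = d' :: m' ∧ d' ≠ 'e' ∧ d' ≠ 'E' := by
      rcases m with _ | ⟨y, m'⟩
      · exact ⟨d, [], rfl, hd1, hd2⟩
      · by_cases h : d = t.1 ∧ y = t.2.1
        · obtain ⟨rfl, rfl⟩ := h
          exact ⟨t.2.2, rep2 t.1 t.2.1 t.2.2 m', by simp [rep2],
                 (goodT_val_ne_E t hg).1, (goodT_val_ne_E t hg).2⟩
        · exact ⟨d, rep2 t.1 t.2.1 t.2.2 (y :: m'), by simp [rep2, h], hd1, hd2⟩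
    obtain ⟨d', m', hdm, hd'1, hd'2⟩ := step
    obtain ⟨hex, hcons⟩ := ih hts' d' m' hd'1 hd'2
    refine ⟨by rw [chain_cons, hdm]; exact hex, ?_⟩
    intro c
    rw [chain_cons, rep2_cons₂_of_ne _ _ _ _ _ _
        (fun hh => (goodT_snd_ne t hg d hd1 hd2) hh.2), hdm, chain_cons, hdm]
    exact hcons c

lemma chain_append (ts₁ ts₂ : List (Char × Char × Char)) (l : List Char) :
    chain (ts₁ ++ ts₂) l = chain ts₂ (chain ts₁ l) := by
  simp [chain, List.foldl_append]

lemma chain_hit (ts₁ ts₂ : List (Char × Char × Char)) (x y v : Char)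
    (h1 : ∀ t ∈ ts₁, goodT t = true) (h2 : ∀ t ∈ ts₂, goodT t = true)
    (hne : ∀ t ∈ ts₁, ¬(x = t.1 ∧ y = t.2.1)) (hy : y = 'e' ∨ y = 'E')
    (hv : v ∈ (['ä','Ä','ö','Ö','ü','Ü'] : List Char)) (m : List Char) :
    chain (ts₁ ++ (x, y, v) :: ts₂) (x :: y :: m) = v :: chain (ts₁ ++ (x, y, v) :: ts₂) m := by
  rw [chain_append, chain_window_ne ts₁ h1 x y hne hy, chain_cons]
  rw [show rep2 (x,y,v).1 (x,y,v).2.1 (x,y,v).2.2 (x :: y :: chain ts₁ m) =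
        v :: rep2 x y v (chain ts₁ m) from rep2_cons_eq x y v _]
  rw [chain_cons_umlaut ts₂ h2 v hv]
  rw [chain_append, chain_cons]

lemma pvTriples_good : ∀ t ∈ pvTriples, goodT t = true := by decide

lemma get?_single_none (c : Char) : PySem.Dict.get? pvUmlautMap [c] = none := by
  simp [PySem.Dict.get?, pvUmlautMap, PySem.Dict.ofList, PySem.Dict.update, PySem.Dict.empty,
        PySem.Dict.insert, List.find?]

lemma get?_some_cases (c c2 v : Char) (h : PySem.Dict.get? pvUmlautMap [c, c2] = some v) :
    (c = 'a' ∧ c2 = 'e' ∧ v = 'ä') ∨ (c = 'A' ∧ c2 = 'e' ∧ v = 'Ä') ∨ (c = 'A' ∧ c2 = 'E' ∧ v = 'Ä') ∨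
    (c = 'o' ∧ c2 = 'e' ∧ v = 'ö') ∨ (c = 'O' ∧ c2 = 'e' ∧ v = 'Ö') ∨ (c = 'O' ∧ c2 = 'E' ∧ v = 'Ö') ∨
    (c = 'u' ∧ c2 = 'e' ∧ v = 'ü') ∨ (c = 'U' ∧ c2 = 'e' ∧ v = 'Ü') ∨ (c = 'U' ∧ c2 = 'E' ∧ v = 'Ü') := by
  simp [PySem.Dict.get?, pvUmlautMap, PySem.Dict.ofList, PySem.Dict.update, PySem.Dict.empty,
        PySem.Dict.insert, List.find?] at h
  obtain ⟨a, h⟩ := h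
  repeat' split at h
  · rename_i heq
    simp only [Bool.and_eq_true, beq_iff_eq] at heq
    simp only [Option.some.injEq, Prod.mk.injEq] at h
    exact Or.inl ⟨heq.1.symm, heq.2.symm, h.2.symm⟩
  · rename_i heq
    simp only [Bool.and_eq_true, beq_iff_eq] at heq
    simp only [Option.some.injEq, Prod.mk.injEq] at h
    exact Or.inr (Or.inl ⟨heq.1.symm, heq.2.symm, h.2.symm⟩)
  · rename_i heq
    simp only [Bool.and_eq_true, beq_iff_eq] at heq
    simp only [Option.some.injEq, Prod.mk.injEq] at h
    exact Or.inr (Or.inr (Or.inl ⟨heq.1.symm, heq.2.symm, h.2.symm⟩))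
  · rename_i heq
    simp only [Bool.and_eq_true, beq_iff_eq] at heq
    simp only [Option.some.injEq, Prod.mk.injEq] at h
    exact Or.inr (Or.inr (Or.inr (Or.inl ⟨heq.1.symm, heq.2.symm, h.2.symm⟩)))
  · rename_i heq
    simp only [Bool.and_eq_true, beq_iff_eq] at heq
    simp only [Option.some.injEq, Prod.mk.injEq] at h
    exact Or.inr (Or.inr (Or.inr (Or.inr (Or.inl ⟨heq.1.symm, heq.2.symm, h.2.symm⟩))))
  · rename_i heq
    simp only [Bool.and_eq_true, beq_iff_eq] at heq
    simp only [Option.some.injEq, Prod.mk.injEq] at h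
    exact Or.inr (Or.inr (Or.inr (Or.inr (Or.inr (Or.inl ⟨heq.1.symm, heq.2.symm, h.2.symm⟩)))))
  · rename_i heq
    simp only [Bool.and_eq_true, beq_iff_eq] at heq
    simp only [Option.some.injEq, Prod.mk.injEq] at h
    exact Or.inr (Or.inr (Or.inr (Or.inr (Or.inr (Or.inr (Or.inl ⟨heq.1.symm, heq.2.symm, h.2.symm⟩))))))
  · rename_i heq
    simp only [Bool.and_eq_true, beq_iff_eq] at heq
    simp only [Option.some.injEq, Prod.mk.injEq] at h
    exact Or.inr (Or.inr (Or.inr (Or.inr (Or.inr (Or.inr (Or.inr (Or.inl ⟨heq.1.symm, heq.2.symm, h.2.symm⟩)))))))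
  · rename_i heq
    simp only [Bool.and_eq_true, beq_iff_eq] at heq
    simp only [Option.some.injEq, Prod.mk.injEq] at h
    exact Or.inr (Or.inr (Or.inr (Or.inr (Or.inr (Or.inr (Or.inr (Or.inr ⟨heq.1.symm, heq.2.symm, h.2.symm⟩)))))))
  · exact absurd h (by simp)

lemma get?_none_window (c c2 : Char) (h : PySem.Dict.get? pvUmlautMap [c, c2] = none) :
    ∀ t ∈ pvTriples, ¬(c = t.1 ∧ c2 = t.2.1) := by
  intro t ht hw
  fin_cases ht <;> (obtain ⟨rfl, rfl⟩ := hw) <;> exact absurd h (by decide)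

lemma chain_eq_scan : ∀ l, chain pvTriples l = pvScan l := by
  intro l
  induction l using pvScan.induct with
  | case1 => exact chain_nil _
  | case2 c r h =>
    exact absurd h (by rw [get?_single_none]; simp)
  | case3 c h =>
    rw [show pvScan [c] = [c] by rw [pvScan, get?_single_none]]
    exact chain_singleton _ _
  | case4 c c2 t r h ih =>
    rw [show pvScan (c :: c2 :: t) = r :: pvScan t by rw [pvScan, h]]
    rcases get?_some_cases c c2 r h with
      ⟨rfl,rfl,rfl⟩|⟨rfl,rfl,rfl⟩|⟨rfl,rfl,rfl⟩|⟨rfl,rfl,rfl⟩|⟨rfl,rfl,rfl⟩|⟨rfl,rfl,rfl⟩|⟨rfl,rfl,rfl⟩|⟨rfl,rfl,rfl⟩|⟨rfl,rfl,rfl⟩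
    · rw [show pvTriples = [] ++ ('a','e','ä') :: [('A','e','Ä'), ('A','E','Ä'), ('o','e','ö'), ('O','e','Ö'), ('O','E','Ö'), ('u','e','ü'), ('U','e','Ü'), ('U','E','Ü')] from rfl] at ih ⊢
      rw [chain_hit _ _ _ _ _ (by decide) (by decide) (by decide) (by decide) (by decide), ih]
    · rw [show pvTriples = [('a','e','ä')] ++ ('A','e','Ä') :: [('A','E','Ä'), ('o','e','ö'), ('O','e','Ö'), ('O','E','Ö'), ('u','e','ü'), ('U','e','Ü'), ('U','E','Ü')] from rfl] at ih ⊢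
      rw [chain_hit _ _ _ _ _ (by decide) (by decide) (by decide) (by decide) (by decide), ih]
    · rw [show pvTriples = [('a','e','ä'), ('A','e','Ä')] ++ ('A','E','Ä') :: [('o','e','ö'), ('O','e','Ö'), ('O','E','Ö'), ('u','e','ü'), ('U','e','Ü'), ('U','E','Ü')] from rfl] at ih ⊢
      rw [chain_hit _ _ _ _ _ (by decide) (by decide) (by decide) (by decide) (by decide), ih]
    · rw [show pvTriples = [('a','e','ä'), ('A','e','Ä'), ('A','E','Ä')] ++ ('o','e','ö') :: [('O','e','Ö'), ('O','E','Ö'), ('u','e','ü'), ('U','e','Ü'), ('U','E','Ü')] from rfl] at ih ⊢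
      rw [chain_hit _ _ _ _ _ (by decide) (by decide) (by decide) (by decide) (by decide), ih]
    · rw [show pvTriples = [('a','e','ä'), ('A','e','Ä'), ('A','E','Ä'), ('o','e','ö')] ++ ('O','e','Ö') :: [('O','E','Ö'), ('u','e','ü'), ('U','e','Ü'), ('U','E','Ü')] from rfl] at ih ⊢
      rw [chain_hit _ _ _ _ _ (by decide) (by decide) (by decide) (by decide) (by decide), ih]
    · rw [show pvTriples = [('a','e','ä'), ('A','e','Ä'), ('A','E','Ä'), ('o','e','ö'), ('O','e','Ö')] ++ ('O','E','Ö') :: [('u','e','ü'), ('U','e','Ü'), ('U','E','Ü')] from rfl] at ih ⊢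
      rw [chain_hit _ _ _ _ _ (by decide) (by decide) (by decide) (by decide) (by decide), ih]
    · rw [show pvTriples = [('a','e','ä'), ('A','e','Ä'), ('A','E','Ä'), ('o','e','ö'), ('O','e','Ö'), ('O','E','Ö')] ++ ('u','e','ü') :: [('U','e','Ü'), ('U','E','Ü')] from rfl] at ih ⊢
      rw [chain_hit _ _ _ _ _ (by decide) (by decide) (by decide) (by decide) (by decide), ih]
    · rw [show pvTriples = [('a','e','ä'), ('A','e','Ä'), ('A','E','Ä'), ('o','e','ö'), ('O','e','Ö'), ('O','E','Ö'), ('u','e','ü')] ++ ('U','e','Ü') :: [('U','E','Ü')] from rfl] at ih ⊢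
      rw [chain_hit _ _ _ _ _ (by decide) (by decide) (by decide) (by decide) (by decide), ih]
    · rw [show pvTriples = [('a','e','ä'), ('A','e','Ä'), ('A','E','Ä'), ('o','e','ö'), ('O','e','Ö'), ('O','E','Ö'), ('u','e','ü'), ('U','e','Ü')] ++ ('U','E','Ü') :: [] from rfl] at ih ⊢
      rw [chain_hit _ _ _ _ _ (by decide) (by decide) (by decide) (by decide) (by decide), ih]
  | case5 c c2 t h ih =>
    rw [show pvScan (c :: c2 :: t) = c :: pvScan (c2 :: t) by rw [pvScan, h]]
    rw [← ih]
    by_cases hc2 : c2 = 'e' ∨ c2 = 'E'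
    · rw [chain_window_ne pvTriples pvTriples_good c c2 (get?_none_window c c2 h) hc2,
          chain_cons_E pvTriples pvTriples_good c2 hc2]
    · rw [not_or] at hc2
      exact (chain_keep pvTriples pvTriples_good c2 t hc2.1 hc2.2).2 c

-- ===== VERDICT (by name: the statement is the Claim_ definition above) =====
theorem normalisiere_umlaut_spec : Claim_equal_normalisiere_umlaut := by
  intro text _
  unfold Spec_normalisiere_umlaut
  have hitems : (PySem.Dict.items pvUmlauteDict) =
      [("ae", "ä"), ("Ae", "Ä"), ("AE", "Ä"),
       ("oe", "ö"), ("Oe", "Ö"), ("OE", "Ö"),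
       ("ue", "ü"), ("Ue", "Ü"), ("UE", "Ü")] := by decide
  rw [normalisiere_umlaut, hitems]
  simp only [List.foldl_cons, List.foldl_nil, PySem.Str.replace, String.toList_ofList]
  rw [show ("ae".toList) = ['a','e'] from rfl, show ("ä".toList) = ['ä'] from rfl,
     show ("Ae".toList) = ['A','e'] from rfl, show ("Ä".toList) = ['Ä'] from rfl,
     show ("AE".toList) = ['A','E'] from rfl,
     show ("oe".toList) = ['o','e'] from rfl, show ("ö".toList) = ['ö'] from rfl,
     show ("Oe".toList) = ['O','e'] from rfl, show ("Ö".toList) = ['Ö'] from rfl,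
     show ("OE".toList) = ['O','E'] from rfl,
     show ("ue".toList) = ['u','e'] from rfl, show ("ü".toList) = ['ü'] from rfl,
     show ("Ue".toList) = ['U','e'] from rfl, show ("Ü".toList) = ['Ü'] from rfl,
     show ("UE".toList) = ['U','E'] from rfl]
  simp only [replace_eq_rep2]
  rw [normalisiere_umlaut_alt, ← chain_eq_scan]
  rfl
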